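-- pv_equiv track=rewrite | github.com/ThierryDeruyttere/Proj-Database | codegalaxy/codegalaxy/general.py | stripStr
-- ===== SOURCE A (Python) =====
-- def stripStr(string, extra=False):
--     strip = ["\n", "\r"]
--     s = string
--     for i in strip:
--         if extra:
--             s = s.replace(i, " ")
--         else:
--             s = s.replace(i, "")
--     return s
-- ===== SOURCE B (Python) =====
-- def stripStr(string, extra=False):
--     # single pass over the characters instead of two full replace scans
--     if extra:
--         return ''.join(' ' if c in ('\n', '\r') else c for c in string)
--     return ''.join(c for c in string if c not in ('\n', '\r'))
-- ===== Notes on version B (the rewrite author's own statement) =====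
-- stated objective: idiomatic
-- what changed: Replaces the loop over the two-element replacement list with two str.replace scans by a single character-by-character pass that maps or filters newline/CR characters directly.
import Mathlib
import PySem

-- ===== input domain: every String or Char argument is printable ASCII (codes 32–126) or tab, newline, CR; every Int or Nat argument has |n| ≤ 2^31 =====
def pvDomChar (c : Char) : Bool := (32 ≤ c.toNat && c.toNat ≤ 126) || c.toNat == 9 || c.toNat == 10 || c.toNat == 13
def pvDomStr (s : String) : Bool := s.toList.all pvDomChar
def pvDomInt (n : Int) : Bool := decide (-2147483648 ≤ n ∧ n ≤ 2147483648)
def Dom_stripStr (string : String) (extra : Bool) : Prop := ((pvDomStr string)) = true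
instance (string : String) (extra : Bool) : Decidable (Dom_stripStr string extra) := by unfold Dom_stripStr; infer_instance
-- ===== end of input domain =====

-- B replaces A's two str.replace scans (one per replacement-list entry) with a single
-- character-by-character pass (map when extra, filter otherwise); same output, idiomatic.


-- ===== PORT A =====
-- for i in ["\n","\r"]: s = s.replace(i, " " if extra else "")
def stripStr (string : String) (extra : Bool) : String :=
  (["\n", "\r"] : List String).foldl
    (fun s i => if extra then PySem.Str.replace s i " " else PySem.Str.replace s i "") string

-- ===== PORT B =====
-- single pass: ''.join(' ' if c in ('\n','\r') else c for c in string) / filter variant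
def stripStr_alt (string : String) (extra : Bool) : String :=
  if extra then
    String.ofList (string.toList.map (fun c => if c = '\n' ∨ c = '\r' then ' ' else c))
  else
    String.ofList (string.toList.filter (fun c => !(c = '\n' || c = '\r')))

-- ===== PRECONDITION & SPEC =====
def Spec_stripStr (string : String) (extra : Bool) (out : String) : Prop := out = stripStr_alt string extra
instance (string : String) (extra : Bool) (out : String) : Decidable (Spec_stripStr string extra out) := by unfold Spec_stripStr; infer_instance

-- ===== CLAIM (what is proved, stated in full; the proofs are below) =====
def Claim_equal_stripStr : Prop := ∀ (string : String) (extra : Bool), Dom_stripStr string extra → Spec_stripStr string extra (stripStr string extra)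

-- ===== LEMMAS AND PROOFS =====

-- replace with a single-character pattern is a flatMap over the characters
theorem replace_go_single (o : Char) (new : List Char) :
    ∀ (fuel : Nat) (l acc : List Char), l.length ≤ fuel →
      PySem.Chars.replace.go [o] new fuel l acc =
        acc.reverse ++ l.flatMap (fun c => if c = o then new else [c]) := by
  intro fuel
  induction fuel with
  | zero =>
    intro l acc h
    have : l = [] := List.eq_nil_of_length_eq_zero (Nat.le_zero.mp h)
    subst this
    simp [PySem.Chars.replace.go]
  | succ n ih =>
    intro l acc h
    cases l with
    | nil => simp [PySem.Chars.replace.go]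
    | cons c t =>
      simp only [PySem.Chars.replace.go]
      by_cases hc : c = o
      · subst hc
        have hpre : List.isPrefixOf [c] (c :: t) = true := by
          simp [List.isPrefixOf]
        rw [if_pos hpre]
        show PySem.Chars.replace.go [c] new n t (new.reverse ++ acc) = _
        rw [ih t (new.reverse ++ acc) (by simpa using Nat.le_of_succ_le_succ h)]
        simp
      · have hpre : List.isPrefixOf [o] (c :: t) = false := by
          simp [List.isPrefixOf]
          exact fun h' => (hc h'.symm).elim
        rw [if_neg (by simp [hpre])]
        rw [ih t (c :: acc) (by simpa using Nat.le_of_succ_le_succ h)]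
        simp [hc]

theorem replace_single (o : Char) (new s : List Char) :
    PySem.Chars.replace s [o] new = s.flatMap (fun c => if c = o then new else [c]) := by
  unfold PySem.Chars.replace
  simp only [List.isEmpty_cons, if_false, Bool.false_eq_true]
  simpa using replace_go_single o new s.length s [] (le_refl _)

theorem stripStr_toList (s : List Char) (extra : Bool) :
    ((s.flatMap (fun c => if c = '\n' then (if extra then [' '] else []) else [c])).flatMap
        (fun c => if c = '\r' then (if extra then [' '] else []) else [c])) =
      (if extra then s.map (fun c => if c = '\n' ∨ c = '\r' then ' ' else c)
       else s.filter (fun c => !(c = '\n' || c = '\r'))) := by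
  induction s with
  | nil => cases extra <;> simp
  | cons c t ih =>
    cases extra <;>
      · simp only [List.flatMap_cons, List.map_cons, List.filter_cons] at *
        by_cases h1 : c = '\n' <;> by_cases h2 : c = '\r' <;>
          simp_all [List.flatMap_cons]

theorem stripStr_spec' (string : String) (extra : Bool) :
    stripStr string extra = stripStr_alt string extra := by
  have htl : (stripStr string extra).toList = (stripStr_alt string extra).toList := by
    unfold stripStr stripStr_alt
    cases extra <;>
      · simp only [List.foldl_cons, List.foldl_nil, if_true, if_false,
          Bool.false_eq_true]
        rw [PySem.Str.toList_replace, PySem.Str.toList_replace]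
        show PySem.Chars.replace (PySem.Chars.replace string.toList ['\n'] _) ['\r'] _ = _
        rw [replace_single, replace_single]
        first
          | simpa [String.toList_ofList] using stripStr_toList string.toList false
          | simpa [String.toList_ofList] using stripStr_toList string.toList true
  exact String.toList_inj.mp htl

-- ===== VERDICT (by name: the statement is the Claim_ definition above) =====
theorem stripStr_spec : Claim_equal_stripStr := by
  intro string extra _
  exact stripStr_spec' string extra
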